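-- pv_equiv track=rewrite | github.com/posl/comment_recommendation | script/split_gen/5_time/zh/214_C/0.py | process
-- ===== SOURCE A (Python) =====
-- def process(n, s, t):
--     times = [0] * n
--     for i in range(n):
--         times[i] = t[i]
--         if i == 0:
--             times[i] = max(times[i], s[i])
--         else:
--             times[i] = max(times[i], times[i - 1] + s[i])
--     return times
-- ===== SOURCE B (Python) =====
-- def process(n, s, t):
--     # Closed form instead of A's DP recurrence: with prefix sums
--     # P[i] = s[0]+...+s[i], the answer is times[i] = P[i] + max(0, max_{j<=i}(t[j]-P[j])),
--     # computed in three staged passes.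
--     P = []
--     total = 0
--     for i in range(n):
--         total += s[i]
--         P.append(total)
--     M = []
--     best = 0
--     for i in range(n):
--         best = max(best, t[i] - P[i])
--         M.append(best)
--     return [P[i] + M[i] for i in range(n)]
-- ===== Notes on version B (the rewrite author's own statement) =====
-- stated objective: alternative
-- what changed: Replaces A's direct DP recurrence times[i]=max(t[i], times[i-1]+s[i]) with the prefix-sum closed form times[i]=P[i]+max(0, max_{j<=i}(t[j]-P[j])), computed in three staged passes (prefix sums, running max of t[j]-P[j], pointwise sum).
import Mathlib
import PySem

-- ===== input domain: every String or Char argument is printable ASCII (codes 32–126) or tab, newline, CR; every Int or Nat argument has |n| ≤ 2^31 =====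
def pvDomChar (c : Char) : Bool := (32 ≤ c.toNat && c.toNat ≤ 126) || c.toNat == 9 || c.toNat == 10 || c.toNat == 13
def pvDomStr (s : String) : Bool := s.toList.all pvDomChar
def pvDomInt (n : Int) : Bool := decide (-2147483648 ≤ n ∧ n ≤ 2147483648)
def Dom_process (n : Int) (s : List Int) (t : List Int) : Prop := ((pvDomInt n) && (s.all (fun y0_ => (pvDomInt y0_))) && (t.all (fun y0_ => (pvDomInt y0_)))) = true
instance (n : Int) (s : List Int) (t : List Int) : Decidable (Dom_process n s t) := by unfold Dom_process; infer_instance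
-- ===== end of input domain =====

-- B replaces A's DP recurrence max(t[i], times[i-1]+s[i]) with the prefix-sum
-- closed form times[i] = P[i] + max(0, max_{j≤i}(t[j]-P[j])) in three staged
-- passes (objective: alternative).

-- ===== PORT A =====
def process (n : Int) (s : List Int) (t : List Int) : List Int :=
  (PySem.List.pyRange 0 n 1).foldl (fun times i =>
    let v := PySem.List.pyGetD t i 0                    -- times[i] = t[i]
    let v := if i == 0 then
        max v (PySem.List.pyGetD s i 0)                 -- times[i] = max(times[i], s[i])
      else
        max v (PySem.List.pyGetD times (i - 1) 0 + PySem.List.pyGetD s i 0)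
    PySem.List.pySetD times i v)
    (PySem.List.pyRepeat [0] n)                          -- times = [0] * n

-- ===== PORT B =====
def process_alt (n : Int) (s : List Int) (t : List Int) : List Int :=
  -- pass 1: prefix sums P[i] = s[0] + ... + s[i]
  let P := ((PySem.List.pyRange 0 n 1).foldl (fun (st : Int × List Int) i =>
      let total := st.1 + PySem.List.pyGetD s i 0
      (total, st.2 ++ [total])) ((0 : Int), ([] : List Int))).2
  -- pass 2: running max M[i] = max(0, max_{j≤i}(t[j] - P[j]))
  let M := ((PySem.List.pyRange 0 n 1).foldl (fun (st : Int × List Int) i =>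
      let best := max st.1 (PySem.List.pyGetD t i 0 - PySem.List.pyGetD P i 0)
      (best, st.2 ++ [best])) ((0 : Int), ([] : List Int))).2
  -- pass 3: pointwise sum
  (PySem.List.pyRange 0 n 1).map (fun i => PySem.List.pyGetD P i 0 + PySem.List.pyGetD M i 0)

-- ===== PRECONDITION & SPEC =====
-- Pre_ excludes exactly the inputs where A raises IndexError: n larger than len(s) or len(t).
def Pre_process (n : Int) (s : List Int) (t : List Int) : Prop :=
  n ≤ (s.length : Int) ∧ n ≤ (t.length : Int)
instance (n : Int) (s : List Int) (t : List Int) : Decidable (Pre_process n s t) := by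
  unfold Pre_process; infer_instance
def pvWitness_process : Int × List Int × List Int := (3, [1, 5, 2], [4, 0, 9])

def Spec_process (n : Int) (s : List Int) (t : List Int) (out : List Int) : Prop := out = process_alt n s t
instance (n : Int) (s : List Int) (t : List Int) (out : List Int) : Decidable (Spec_process n s t out) := by unfold Spec_process; infer_instance

-- ===== CLAIM (what is proved, stated in full; the proofs are below) =====
def Claim_equal_process : Prop := ∀ (n : Int) (s : List Int) (t : List Int), Dom_process n s t → Pre_process n s t → Spec_process n s t (process n s t)

-- ===== LEMMAS AND PROOFS =====

-- A's loop body, named for the invariant lemma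
def stepA (s t : List Int) (times : List Int) (i : Int) : List Int :=
  let v := PySem.List.pyGetD t i 0
  let v := if i == 0 then
      max v (PySem.List.pyGetD s i 0)
    else
      max v (PySem.List.pyGetD times (i - 1) 0 + PySem.List.pyGetD s i 0)
  PySem.List.pySetD times i v

-- a reference accumulator scan (used only in the proofs, bridging A and B)
def stepB (s t : List Int) (st : Int × List Int) (i : Int) : Int × List Int :=
  let acc := max (PySem.List.pyGetD t i 0) (st.1 + PySem.List.pyGetD s i 0)
  (acc, st.2 ++ [acc])

-- the two pure sequences B computes: prefix sums and their running max
def presum (s : List Int) : Nat → Int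
  | 0 => 0
  | k + 1 => presum s k + s.getD k 0

def mbest (s t : List Int) : Nat → Int
  | 0 => 0
  | k + 1 => max (mbest s t k) (t.getD k 0 - presum s (k + 1))

lemma getD_map_range (f : Nat → Int) (m k : Nat) (d : Int) (h : k < m) :
    ((List.range m).map f).getD k d = f k := by
  rw [List.getD_eq_getElem _ _ (by simpa using h)]
  simp

-- A's loop invariant (A-fold vs the reference scan), by induction on k
lemma loop_inv (s t : List Int) (m k : Nat) (hk : k ≤ m) :
    ∃ acc out,
      (PySem.List.pyRange 0 (k : Int) 1).foldl (stepB s t) (0, []) = (acc, out) ∧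
      out.length = k ∧
      (k ≠ 0 → out.getD (k - 1) 0 = acc) ∧
      (PySem.List.pyRange 0 (k : Int) 1).foldl (stepA s t) (List.replicate m 0)
        = out ++ List.replicate (m - k) 0 := by
  induction k with
  | zero =>
      refine ⟨0, [], ?_, rfl, by simp, ?_⟩ <;>
        simp [PySem.List.pyRange_one_eq_nil]
  | succ k ih =>
      obtain ⟨acc, out, hB, hlen, hlast, hA⟩ := ih (by omega)
      have hsplit : PySem.List.pyRange 0 ((k + 1 : Nat) : Int) 1
          = PySem.List.pyRange 0 (k : Int) 1 ++ [(k : Int)] := by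
        have := PySem.List.pyRange_one_succ_right (a := 0) (b := (k : Int)) (by positivity)
        push_cast
        rw [← this]
      set v : Int := max (PySem.List.pyGetD t (k : Int) 0)
                        (acc + PySem.List.pyGetD s (k : Int) 0) with hv
      refine ⟨v, out ++ [v], ?_, by simp [hlen], ?_, ?_⟩
      · rw [hsplit, List.foldl_append, hB, hv]
        rfl
      · intro _
        have hidx : k + 1 - 1 = out.length := by omega
        rw [hidx, List.getD_append_right _ _ _ _ le_rfl]
        simp
      · rw [hsplit, List.foldl_append, hA]
        have hmk : 0 < m - k := by omega
        have hrep : List.replicate (m - k) (0 : Int)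
            = 0 :: List.replicate (m - k - 1) 0 := by
          cases hmk' : m - k with
          | zero => omega
          | succ j => simp [List.replicate_succ]
        have hvA : (if ((k : Int) == 0) then
              max (PySem.List.pyGetD t (k : Int) 0)
                  (PySem.List.pyGetD s (k : Int) 0)
            else
              max (PySem.List.pyGetD t (k : Int) 0)
                (PySem.List.pyGetD (out ++ List.replicate (m - k) 0) ((k : Int) - 1) 0
                  + PySem.List.pyGetD s (k : Int) 0)) = v := by
            by_cases hk0 : k = 0
            · have hacc : acc = 0 ∧ out = [] := by
                rw [hk0, Nat.cast_zero, PySem.List.pyRange_one_eq_nil le_rfl] at hB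
                simp at hB
                exact ⟨hB.1.symm, hB.2⟩
              subst hk0
              simp [hv, hacc.1]
            · have hkc : ((k : Int) == 0) = false := by
                simp; exact_mod_cast hk0
              rw [hkc]
              simp only [Bool.false_eq_true, if_false]
              have hcast : ((k : Int) - 1) = ((k - 1 : Nat) : Int) := by omega
              rw [hcast, PySem.List.pyGetD_natCast, PySem.List.pyGetD_natCast]
              have hidx : k - 1 < out.length := by omega
              rw [List.getD_append _ _ _ _ hidx, hlast hk0, hv]
              simp
        show PySem.List.pySetD (out ++ List.replicate (m - k) 0) (k : Int) _ = _
        rw [hvA, PySem.List.pySetD_natCast]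
        rw [hrep, List.set_append_right _ _ (by omega)]
        have h0 : k - out.length = 0 := by omega
        rw [h0, List.set_cons_zero]
        have hsub : m - k - 1 = m - (k + 1) := by omega
        rw [hsub]
        simp

-- the reference scan computes presum + mbest, pointwise
lemma scan_eq (s t : List Int) (k : Nat) :
    (PySem.List.pyRange 0 (k : Int) 1).foldl (stepB s t) (0, [])
      = (presum s k + mbest s t k,
         (List.range k).map (fun j => presum s (j + 1) + mbest s t (j + 1))) := by
  induction k with
  | zero => simp [PySem.List.pyRange_one_eq_nil, presum, mbest]
  | succ k ih =>
      have hsplit : PySem.List.pyRange 0 ((k + 1 : Nat) : Int) 1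
          = PySem.List.pyRange 0 (k : Int) 1 ++ [(k : Int)] := by
        have := PySem.List.pyRange_one_succ_right (a := 0) (b := (k : Int)) (by positivity)
        push_cast
        rw [← this]
      rw [hsplit, List.foldl_append, ih]
      have hacc : max (PySem.List.pyGetD t (k : Int) 0)
            (presum s k + mbest s t k + PySem.List.pyGetD s (k : Int) 0)
          = presum s (k + 1) + mbest s t (k + 1) := by
        rw [PySem.List.pyGetD_natCast, PySem.List.pyGetD_natCast]
        show max (t.getD k 0) (presum s k + mbest s t k + s.getD k 0) = _
        have h1 : presum s (k + 1) = presum s k + s.getD k 0 := rfl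
        have h2 : mbest s t (k + 1) = max (mbest s t k) (t.getD k 0 - presum s (k + 1)) := rfl
        rcases le_total (mbest s t k) (t.getD k 0 - presum s (k + 1)) with h | h
        · rw [h2, max_eq_right h, h1]
          rw [max_eq_left (by omega)]
          omega
        · rw [h2, max_eq_left h, h1]
          rw [max_eq_right (by omega)]
          omega
      simp only [stepB, List.foldl_cons, List.foldl_nil, hacc, List.range_succ, List.map_append,
        List.map_cons, List.map_nil]

-- B's first pass computes the prefix sums
lemma pfold_eq (s : List Int) (k : Nat) :
    (PySem.List.pyRange 0 (k : Int) 1).foldl (fun (st : Int × List Int) i =>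
        let total := st.1 + PySem.List.pyGetD s i 0
        (total, st.2 ++ [total])) ((0 : Int), ([] : List Int))
      = (presum s k, (List.range k).map (fun j => presum s (j + 1))) := by
  induction k with
  | zero => simp [PySem.List.pyRange_one_eq_nil, presum]
  | succ k ih =>
      have hsplit : PySem.List.pyRange 0 ((k + 1 : Nat) : Int) 1
          = PySem.List.pyRange 0 (k : Int) 1 ++ [(k : Int)] := by
        have := PySem.List.pyRange_one_succ_right (a := 0) (b := (k : Int)) (by positivity)
        push_cast
        rw [← this]
      rw [hsplit, List.foldl_append, ih]
      simp [List.range_succ, presum]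

-- B's second pass computes the running maxes, given its reads into P land in range
lemma mfold_eq (s t : List Int) (m : Nat) (k : Nat) (hk : k ≤ m) :
    (PySem.List.pyRange 0 (k : Int) 1).foldl (fun (st : Int × List Int) i =>
        let best := max st.1 (PySem.List.pyGetD t i 0
          - PySem.List.pyGetD ((List.range m).map (fun j => presum s (j + 1))) i 0)
        (best, st.2 ++ [best])) ((0 : Int), ([] : List Int))
      = (mbest s t k, (List.range k).map (fun j => mbest s t (j + 1))) := by
  induction k with
  | zero => simp [PySem.List.pyRange_one_eq_nil, mbest]
  | succ k ih =>
      have hsplit : PySem.List.pyRange 0 ((k + 1 : Nat) : Int) 1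
          = PySem.List.pyRange 0 (k : Int) 1 ++ [(k : Int)] := by
        have := PySem.List.pyRange_one_succ_right (a := 0) (b := (k : Int)) (by positivity)
        push_cast
        rw [← this]
      rw [hsplit, List.foldl_append, ih (by omega)]
      simp only [List.foldl_cons, List.foldl_nil, PySem.List.pyGetD_natCast]
      rw [getD_map_range _ m k 0 (by omega)]
      simp [List.range_succ, mbest]

-- B unfolded to the pure closed form
lemma alt_eq (s t : List Int) (m : Nat) :
    process_alt (m : Int) s t
      = (List.range m).map (fun j => presum s (j + 1) + mbest s t (j + 1)) := by
  unfold process_alt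
  simp only [pfold_eq s m]
  simp only [mfold_eq s t m m le_rfl]
  rw [PySem.List.pyRange_one (a := 0) (b := (m : Int))]
  have hm : ((m : Int) - 0).toNat = m := by omega
  rw [hm, List.map_map]
  apply List.map_congr_left
  intro k hk
  have hkm : k < m := List.mem_range.mp hk
  simp only [Function.comp_apply, zero_add, PySem.List.pyGetD_natCast]
  rw [getD_map_range _ m k 0 hkm, getD_map_range _ m k 0 hkm]

lemma process_eq (n : Int) (s : List Int) (t : List Int)
    (h : Pre_process n s t) : process n s t = process_alt n s t := by
  by_cases hn : 0 ≤ n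
  · obtain ⟨m, rfl⟩ := Int.eq_ofNat_of_zero_le hn
    obtain ⟨acc, out, hB, hlen, -, hA⟩ := loop_inv s t m m le_rfl
    rw [scan_eq s t m] at hB
    have hout : out = (List.range m).map (fun j => presum s (j + 1) + mbest s t (j + 1)) :=
      (congrArg Prod.snd hB).symm
    unfold process
    have hrepeat : PySem.List.pyRepeat [(0 : Int)] (m : Int) = List.replicate m 0 := by
      rw [PySem.List.pyRepeat_singleton]; simp
    calc (PySem.List.pyRange 0 (m : Int) 1).foldl _ (PySem.List.pyRepeat [0] (m : Int))
        = (PySem.List.pyRange 0 (m : Int) 1).foldl (stepA s t) (List.replicate m 0) := by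
          rw [hrepeat]; rfl
      _ = out := by rw [hA]; simp
      _ = process_alt (m : Int) s t := by rw [hout, alt_eq]
  · unfold process process_alt
    rw [PySem.List.pyRange_one_eq_nil (by omega)]
    simp [PySem.List.pyRepeat_singleton]
    omega

-- ===== VERDICT (by name: the statement is the Claim_ definition above) =====
theorem process_spec : Claim_equal_process := by
  intro n s t _ hpre
  unfold Spec_process
  exact process_eq n s t hpre
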